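-- pv_equiv track=rewrite | github.com/p-lots/codewars | 7-kyu/simple-fun-#263--even-numbers-before-fixed/python/solution.py | even_numbers_before_fixed
-- ===== SOURCE A (Python) =====
-- def even_numbers_before_fixed(sequence, fixed_element):
--     ret = 0
--     for n in sequence:
--         if n == fixed_element:
--             return ret
--         elif n % 2 == 0:
--             ret += 1
--     return -1
-- ===== SOURCE B (Python) =====
-- def even_numbers_before_fixed(sequence, fixed_element):
--     try:
--         idx = sequence.index(fixed_element)
--     except ValueError:
--         return -1
--     return sum(1 for n in sequence[:idx] if n % 2 == 0)
-- ===== Notes on version B (the rewrite author's own statement) =====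
-- stated objective: simpler
-- what changed: Replaces the fused early-returning scan with a running counter by a two-phase computation: locate the first occurrence with list.index (ValueError -> -1), then count evens in the prefix slice.
import Mathlib
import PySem

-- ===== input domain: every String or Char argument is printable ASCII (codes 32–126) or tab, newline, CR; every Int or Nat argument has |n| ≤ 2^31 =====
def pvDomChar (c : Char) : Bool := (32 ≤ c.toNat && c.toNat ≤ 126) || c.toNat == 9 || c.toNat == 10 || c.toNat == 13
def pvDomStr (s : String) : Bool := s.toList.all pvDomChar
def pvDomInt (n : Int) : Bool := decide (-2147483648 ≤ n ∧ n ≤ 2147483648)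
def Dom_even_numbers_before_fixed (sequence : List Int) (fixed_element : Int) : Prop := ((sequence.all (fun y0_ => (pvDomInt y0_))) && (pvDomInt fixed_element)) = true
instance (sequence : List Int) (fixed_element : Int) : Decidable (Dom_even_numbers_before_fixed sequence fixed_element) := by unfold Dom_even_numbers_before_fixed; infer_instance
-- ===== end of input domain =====

-- B finds the first occurrence with list.index and counts evens in the prefix slice, instead of A's fused early-returning scan with a running counter (objective: simpler).


-- ===== PORT A =====
-- the for-loop with early return and the running counter `ret`
def evenA_loop (sequence : List Int) (fixed_element : Int) (ret : Int) : Int :=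
  match sequence with
  | [] => -1
  | n :: rest =>
      if n = fixed_element then ret
      else if PySem.Int.mod n 2 = 0 then evenA_loop rest fixed_element (ret + 1)
      else evenA_loop rest fixed_element ret

def even_numbers_before_fixed (sequence : List Int) (fixed_element : Int) : Int :=
  evenA_loop sequence fixed_element 0

-- ===== PORT B =====
def even_numbers_before_fixed_alt (sequence : List Int) (fixed_element : Int) : Int :=
  match PySem.List.index? sequence fixed_element with
  | none => -1
  | some idx =>
      ((PySem.List.slice sequence none (some (idx : Int))).countP
        (fun n => PySem.Int.mod n 2 == 0) : Int)

-- ===== PRECONDITION & SPEC =====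
def Spec_even_numbers_before_fixed (sequence : List Int) (fixed_element : Int) (out : Int) : Prop := out = even_numbers_before_fixed_alt sequence fixed_element
instance (sequence : List Int) (fixed_element : Int) (out : Int) : Decidable (Spec_even_numbers_before_fixed sequence fixed_element out) := by unfold Spec_even_numbers_before_fixed; infer_instance

-- ===== CLAIM (what is proved, stated in full; the proofs are below) =====
def Claim_equal_even_numbers_before_fixed : Prop := ∀ (sequence : List Int) (fixed_element : Int), Dom_even_numbers_before_fixed sequence fixed_element → Spec_even_numbers_before_fixed sequence fixed_element (even_numbers_before_fixed sequence fixed_element)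

-- ===== LEMMAS AND PROOFS =====
-- Loop invariant: A's loop computes ret plus the even-count of the prefix before
-- the first occurrence (or -1 when fixed_element is absent).
theorem evenA_loop_eq (sequence : List Int) (fixed_element : Int) (ret : Int) :
    evenA_loop sequence fixed_element ret =
      match PySem.List.index? sequence fixed_element with
      | none => -1
      | some i => ret + ((sequence.take i).countP (fun n => PySem.Int.mod n 2 == 0) : Int) := by
  induction sequence generalizing ret with
  | nil => simp [evenA_loop, PySem.List.index?]
  | cons n rest ih =>
      by_cases h : n = fixed_element
      · subst h
        rw [PySem.List.index?_cons_self]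
        simp [evenA_loop]
      · rw [evenA_loop, if_neg h, PySem.List.index?_cons_of_ne rest h]
        by_cases he : PySem.Int.mod n 2 = 0
        · rw [if_pos he, ih]
          cases hidx : PySem.List.index? rest fixed_element with
          | none => simp
          | some i =>
              have h2 : (2 : Int) ∣ n := (PySem.Int.mod_eq_zero_iff_dvd n 2).mp he
              simp [h2]
              ring
        · rw [if_neg he, ih]
          cases hidx : PySem.List.index? rest fixed_element with
          | none => simp
          | some i =>
              have h2 : ¬ (2 : Int) ∣ n := fun hd => he ((PySem.Int.mod_eq_zero_iff_dvd n 2).mpr hd)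
              simp [h2]

-- ===== VERDICT (by name: the statement is the Claim_ definition above) =====
theorem even_numbers_before_fixed_spec : Claim_equal_even_numbers_before_fixed := by
  intro sequence fixed_element _
  unfold Spec_even_numbers_before_fixed even_numbers_before_fixed even_numbers_before_fixed_alt
  rw [evenA_loop_eq]
  cases hidx : PySem.List.index? sequence fixed_element with
  | none => rfl
  | some i => simp [PySem.List.slice_to_natCast]
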